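-- pv_equiv track=rewrite | github.com/lomoonmoonbird/email_mimic_component | judge.py | left_judge
-- ===== SOURCE A (Python) =====
-- from collections import Counter
--
-- def left_judge(response_map, threshold=3, total=3):
--     """左括号裁决"""
--     keys = list(response_map.keys())
--     from itertools import combinations
--     combin_keys = list(combinations(keys, 2))
--     same_count = 0
--     counter = []
--     if len(keys) >= threshold:
--         for ck in combin_keys:
--             if set(response_map[ck[0]][:-1]) == set(response_map[ck[1]][:-1]):
--                 same_count += 1
--                 counter.append(ck[0])
--                 counter.append(ck[1])
--         if same_count >= total - 1:
--             a = Counter(counter)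
--             a = sorted(a.items(), key=lambda x:x[0], reverse=True)
--             key = a[0][0]
--             return response_map[key]
--     return []
-- ===== SOURCE B (Python) =====
-- from collections import Counter
--
-- def left_judge(response_map, threshold=3, total=3):
--     """左括号裁决 — one grouping pass over canonical set-signatures instead of all key pairs"""
--     if len(response_map) < threshold:
--         return []
--     sigs = [(k, tuple(sorted(set(v[:-1])))) for k, v in response_map.items()]
--     cnt = Counter(s for _, s in sigs)
--     pairs = sum(c * (c - 1) // 2 for c in cnt.values())
--     dups = [k for k, s in sigs if cnt[s] >= 2]
--     if pairs < total - 1 or not dups: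
--         return []
--     return response_map[max(dups)]
-- ===== Notes on version B (the rewrite author's own statement) =====
-- stated objective: faster
-- what changed: B replaces A's scan over all n*(n-1)/2 key pairs by one grouping pass: each value gets a canonical set-signature sorted(set(v[:-1])), a Counter over these signatures yields the number of matching pairs as the sum of g*(g-1)/2 per group, and the answer key is the max key whose signature group has size at least 2, instead of building the pair list, a Counter of pair members and a descending sort.
import Mathlib
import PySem

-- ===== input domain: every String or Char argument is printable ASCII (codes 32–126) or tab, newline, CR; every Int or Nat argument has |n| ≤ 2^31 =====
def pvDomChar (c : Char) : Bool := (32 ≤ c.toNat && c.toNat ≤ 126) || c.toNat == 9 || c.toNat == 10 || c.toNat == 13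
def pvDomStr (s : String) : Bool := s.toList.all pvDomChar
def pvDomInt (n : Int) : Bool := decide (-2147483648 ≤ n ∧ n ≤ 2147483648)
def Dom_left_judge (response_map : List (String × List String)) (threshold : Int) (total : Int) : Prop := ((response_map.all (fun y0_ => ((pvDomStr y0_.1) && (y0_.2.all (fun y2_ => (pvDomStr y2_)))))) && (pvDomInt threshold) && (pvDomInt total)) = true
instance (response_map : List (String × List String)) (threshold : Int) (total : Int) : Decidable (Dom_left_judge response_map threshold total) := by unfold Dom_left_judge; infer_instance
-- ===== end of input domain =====

-- B replaces A's pass over all C(n,2) key pairs by one grouping pass over canonical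
-- set-signatures (objective: faster, asymptotically fewer signature comparisons).

-- set(v[:-1]) — the set-signature both versions compare
def pvSigSet (v : List String) : PySem.Set String :=
  PySem.Set.ofList (PySem.List.slice v none (some (-1)))

-- ===== PORT A =====
def left_judge (response_map : List (String × List String)) (threshold : Int) (total : Int) : List String :=
  let d := PySem.Dict.ofList response_map
  let keys := d.keys
  let combin_keys := PySem.List.combinations keys 2
  if threshold ≤ (keys.length : Int) then
    let st := combin_keys.foldl (fun st ck =>
      match ck with
      | [a, b] =>
        if PySem.Set.equal (pvSigSet (d.getD a [])) (pvSigSet (d.getD b [])) then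
          (st.1 + 1, st.2 ++ [a, b])
        else st
      | _ => st) ((0 : Int), ([] : List String))
    if total - 1 ≤ st.1 then
      match PySem.List.sorted (PySem.Dict.counter st.2).items (fun x => x.1) true with
      | [] => []        -- Python: a[0] raises IndexError here; excluded by Pre_left_judge
      | p :: _ => d.getD p.1 []
    else []
  else []

-- ===== PORT B =====
-- tuple(sorted(set(v[:-1]))) — the canonical (hashable) form of the set-signature
def pvCanon (v : List String) : List String :=
  PySem.List.sorted (pvSigSet v) (fun x => x)

def left_judge_alt (response_map : List (String × List String)) (threshold : Int) (total : Int) : List String :=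
  let d := PySem.Dict.ofList response_map
  if (d.items.length : Int) < threshold then []
  else
    let sigs := d.items.map (fun p => (p.1, pvCanon p.2))
    let cnt := PySem.Dict.counter (sigs.map (fun q => q.2))
    let pairs := (cnt.values.map (fun c => PySem.Int.floordiv (c * (c - 1)) 2)).sum
    let dups := (sigs.filter (fun q => 2 ≤ cnt.getD q.2 0)).map (fun q => q.1)
    if pairs < total - 1 ∨ dups = [] then []
    else
      match PySem.List.max? dups (fun x => x) with
      | some m => d.getD m []
      | none => []      -- unreachable: dups ≠ [] in this branch

-- ===== PRECONDITION & SPEC =====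
-- Pre_ excludes exactly the inputs where the Python A raises IndexError indexing the sorted Counter items:
-- at least `threshold` keys, total <= 1, and all set-signatures pairwise distinct,
-- so that no pair matches and there is no Counter entry to index.
def Pre_left_judge (response_map : List (String × List String)) (threshold : Int) (total : Int) : Prop :=
  ¬ (threshold ≤ (((PySem.Dict.ofList response_map).items.length : Nat) : Int) ∧ total ≤ 1 ∧
      ((PySem.Dict.ofList response_map).items.map (fun p => pvCanon p.2)).Nodup)
instance (response_map : List (String × List String)) (threshold : Int) (total : Int) : Decidable (Pre_left_judge response_map threshold total) := by unfold Pre_left_judge; infer_instance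

def pvWitness_left_judge : (List (String × List String)) × Int × Int :=
  ([("a", ["x", "e"]), ("b", ["x", "e"]), ("c", ["y", "e"])], 3, 3)

def Spec_left_judge (response_map : List (String × List String)) (threshold : Int) (total : Int) (out : List String) : Prop := out = left_judge_alt response_map threshold total
instance (response_map : List (String × List String)) (threshold : Int) (total : Int) (out : List String) : Decidable (Spec_left_judge response_map threshold total out) := by unfold Spec_left_judge; infer_instance

-- ===== CLAIM (what is proved, stated in full; the proofs are below) =====
def Claim_equal_left_judge : Prop := ∀ (response_map : List (String × List String)) (threshold : Int) (total : Int), Dom_left_judge response_map threshold total → Pre_left_judge response_map threshold total → Spec_left_judge response_map threshold total (left_judge response_map threshold total)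


-- ===== LEMMAS AND PROOFS =====

def pvS (p : String × List String) : List String := pvCanon p.2
def pvEqB (p q : String × List String) : Bool :=
  PySem.Set.equal (pvSigSet p.2) (pvSigSet q.2)

lemma pv_equal_iff_canon (p q : String × List String) :
    pvEqB p q = true ↔ pvS p = pvS q := by
  unfold pvEqB pvS pvCanon pvSigSet
  rw [PySem.List.sorted_id_eq_sorted_id_iff_perm, PySem.Set.equal_iff,
    List.perm_ext_iff_of_nodup (PySem.Set.nodup_ofList _) (PySem.Set.nodup_ofList _)]

lemma pv_tri (c : Nat) : (c + 1) * c / 2 = c * (c - 1) / 2 + c := by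
  obtain ⟨x, hx⟩ : 2 ∣ c * (c - 1) := by
    rcases c with _ | k
    · simp
    · simpa [Nat.succ_sub_one, mul_comm] using (Nat.even_mul_succ_self k).two_dvd
  obtain ⟨y, hy⟩ : 2 ∣ (c + 1) * c := by
    simpa [mul_comm] using (Nat.even_mul_succ_self c).two_dvd
  have h3 : (c + 1) * c = c * (c - 1) + 2 * c := by
    rcases c with _ | k
    · simp
    · simp only [Nat.add_sub_cancel]; ring
  omega
def pvStep (st : Int × List String) (c : List (String × List String)) : Int × List String :=
  match c with
  | [p, q] => if pvEqB p q then (st.1 + 1, st.2 ++ [p.1, q.1]) else st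
  | _ => st
def pvMCount : List (String × List String) → Int
  | [] => 0
  | p :: t => (t.countP (fun q => pvEqB p q) : Int) + pvMCount t
def pvCList : List (String × List String) → List String
  | [] => []
  | p :: t => t.flatMap (fun q => if pvEqB p q then [p.1, q.1] else []) ++ pvCList t

lemma pv_loopA (l : List (String × List String)) (n : Int) (acc : List String) :
    (PySem.List.combinations l 2).foldl pvStep (n, acc) = (n + pvMCount l, acc ++ pvCList l) := by
  induction l generalizing n acc with
  | nil =>
    simp [PySem.List.combinations_nil_succ, pvMCount, pvCList]
  | cons p t ih =>
    rw [show (2 : Nat) = 1 + 1 from rfl, PySem.List.combinations_cons_succ,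
      PySem.List.combinations_one, List.foldl_append, List.map_map]
    rw [List.foldl_map]
    have hstep : (fun (st : Int × List String) q => pvStep st (((fun c => p :: c) ∘ fun x => [x]) q)) =
        (fun (st : Int × List String) q =>
          ((if pvEqB p q then st.1 + 1 else st.1),
           st.2 ++ (if pvEqB p q then [p.1, q.1] else []))) := by
      funext st q
      simp only [pvStep]
      by_cases h : pvEqB p q <;> simp [h]
    rw [hstep,
      PySem.List.foldl_prod_mk (f := fun a q => if pvEqB p q then a + 1 else a)
        (g := fun b q => b ++ (if pvEqB p q then [p.1, q.1] else [])) t n acc,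
      ]
    rw [PySem.List.foldl_if_add_one, PySem.List.foldl_append_eq_flatMap]
    rw [ih]
    simp [pvMCount, pvCList, add_assoc]
def pvFN (c : Nat) : Nat := c * (c - 1) / 2
def pvRN (sl : List (List String)) : Nat := (sl.dedup.map (fun v => pvFN (sl.count v))).sum

lemma pv_sum_update {α : Type} [DecidableEq α] (L : List α) (g1 g2 : α → Nat) (a : α) (d : Nat)
    (hnd : L.Nodup) (ha : a ∈ L) (h : ∀ v ∈ L, v ≠ a → g1 v = g2 v) (hA : g1 a = g2 a + d) :
    (L.map g1).sum = (L.map g2).sum + d := by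
  induction L with
  | nil => simp at ha
  | cons x t ih =>
    rcases List.nodup_cons.mp hnd with ⟨hx, hndt⟩
    rcases List.mem_cons.mp ha with rfl | hat
    · have ht : ∀ v ∈ t, g1 v = g2 v := fun v hv => h v (List.mem_cons_of_mem _ hv)
        (fun he => hx (he ▸ hv))
      simp [hA, List.map_congr_left ht]
      omega
    · have hxa : x ≠ a := fun he => hx (he ▸ hat)
      rw [List.map_cons, List.map_cons, List.sum_cons, List.sum_cons,
        h x (List.mem_cons_self) hxa,
        ih hndt hat (fun v hv => h v (List.mem_cons_of_mem _ hv))]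
      omega

lemma pv_RN_cons (a : List String) (sl : List (List String)) :
    pvRN (a :: sl) = sl.count a + pvRN sl := by
  unfold pvRN
  by_cases ha : a ∈ sl
  · rw [List.dedup_cons_of_mem ha]
    rw [pv_sum_update sl.dedup (fun v => pvFN ((a :: sl).count v)) (fun v => pvFN (sl.count v))
      a (sl.count a) (List.nodup_dedup sl) (List.mem_dedup.mpr ha)
      (fun v _ hv => by
        show pvFN (List.count v (a :: sl)) = pvFN (List.count v sl)
        rw [List.count_cons_of_ne (Ne.symm hv)])
      (by
        show pvFN (List.count a (a :: sl)) = pvFN (List.count a sl) + List.count a sl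
        rw [List.count_cons_self]
        exact pv_tri _)]
    omega
  · rw [List.dedup_cons_of_notMem ha, List.map_cons, List.sum_cons,
      List.count_cons_self, List.count_eq_zero_of_not_mem ha]
    have hfn : pvFN 1 = 0 := rfl
    have : ∀ v ∈ sl.dedup, pvFN ((a :: sl).count v) = pvFN (sl.count v) := by
      intro v hv
      rw [List.count_cons_of_ne (by intro he; exact ha (he ▸ List.mem_dedup.mp hv))]
    rw [hfn, List.map_congr_left this]

lemma pv_mcount_eq (l : List (String × List String)) :
    pvMCount l = (pvRN (l.map pvS) : Int) := by
  induction l with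
  | nil => simp [pvMCount, pvRN]
  | cons p t ih =>
    rw [List.map_cons, pv_RN_cons]
    have hb : ∀ q' ∈ t, pvEqB p q' = true ↔ ((fun x => x == pvS p) ∘ pvS) q' = true := by
      intro q' _
      simp only [Function.comp, beq_iff_eq]
      rw [pv_equal_iff_canon p q']
      exact eq_comm
    have hc : t.countP (fun q => pvEqB p q) = List.count (pvS p) (t.map pvS) := by
      rw [List.count_eq_countP, List.countP_map, List.countP_congr hb]
    rw [show pvMCount (p :: t) = (t.countP (fun q => pvEqB p q) : Int) + pvMCount t from rfl,
      hc, ih]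
    push_cast
    ring
def pvDList (l : List (String × List String)) : List String :=
  (l.filter (fun p => 2 ≤ (l.map pvS).count (pvS p))).map (fun p => p.1)

lemma pv_fN_eq_zero_iff (c : Nat) : pvFN c = 0 ↔ c ≤ 1 := by
  rcases c with _ | _ | k
  · simp [pvFN]
  · simp [pvFN]
  · simp only [pvFN, Nat.add_sub_cancel]
    constructor
    · intro h
      have hge : 2 * 1 ≤ (k + 1 + 1) * (k + 1) := Nat.mul_le_mul (by omega) (by omega)
      have h1 : 1 ≤ (k + 1 + 1) * (k + 1) / 2 :=
        (Nat.le_div_iff_mul_le (by omega : 0 < 2)).mpr (by omega)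
      omega
    · intro h
      omega

lemma pv_RN_zero_iff (sl : List (List String)) : pvRN sl = 0 ↔ sl.Nodup := by
  unfold pvRN
  rw [List.sum_eq_zero_iff, List.nodup_iff_count_le_one]
  constructor
  · intro h a
    by_cases ha : a ∈ sl
    · have := h (pvFN (sl.count a)) (List.mem_map.mpr ⟨a, List.mem_dedup.mpr ha, rfl⟩)
      exact (pv_fN_eq_zero_iff _).mp this
    · rw [List.count_eq_zero_of_not_mem ha]; omega
  · intro h x hx
    rcases List.mem_map.mp hx with ⟨a, _, rfl⟩
    exact (pv_fN_eq_zero_iff _).mpr (h a)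

lemma pv_clist_mem (l : List (String × List String)) (k : String) :
    k ∈ pvCList l ↔ ∃ r ∈ l, r.1 = k ∧ 2 ≤ (l.map pvS).count (pvS r) := by
  induction l with
  | nil => simp [pvCList]
  | cons p t ih =>
    show k ∈ _ ++ pvCList t ↔ _
    rw [List.mem_append, ih]
    constructor
    · rintro (hfl | ⟨r, hr, hrk, hc⟩)
      · rcases List.mem_flatMap.mp hfl with ⟨q, hq, hkq⟩
        by_cases he : pvEqB p q
        · rw [if_pos he] at hkq
          have hpq : pvS p = pvS q := (pv_equal_iff_canon p q).mp he
          rcases List.mem_cons.mp hkq with rfl | hkq'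
          · refine ⟨p, List.mem_cons_self, rfl, ?_⟩
            rw [List.map_cons, List.count_cons_self]
            have : 1 ≤ List.count (pvS p) (t.map pvS) :=
              List.count_pos_iff.mpr (List.mem_map.mpr ⟨q, hq, hpq.symm⟩)
            omega
          · have : k = q.1 := by simpa using hkq'
            subst this
            refine ⟨q, List.mem_cons_of_mem _ hq, rfl, ?_⟩
            rw [List.map_cons, ← hpq, List.count_cons_self]
            have : 1 ≤ List.count (pvS p) (t.map pvS) :=
              List.count_pos_iff.mpr (List.mem_map.mpr ⟨q, hq, hpq.symm⟩)
            omega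
        · rw [if_neg he] at hkq
          simp at hkq
      · refine ⟨r, List.mem_cons_of_mem _ hr, hrk, ?_⟩
        rw [List.map_cons]
        by_cases hpr : pvS p = pvS r
        · rw [hpr, List.count_cons_self]; omega
        · rw [List.count_cons_of_ne (fun he => hpr he)]; exact hc
    · rintro ⟨r, hrmem, hrk, hc⟩
      rcases List.mem_cons.mp hrmem with rfl | hrt
      · rw [List.map_cons, List.count_cons_self] at hc
        have h1 : 1 ≤ List.count (pvS r) (t.map pvS) := by omega
        rcases List.mem_map.mp (List.count_pos_iff.mp (by omega : 0 < List.count (pvS r) (t.map pvS))) with ⟨q, hq, hqs⟩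
        left
        refine List.mem_flatMap.mpr ⟨q, hq, ?_⟩
        rw [if_pos ((pv_equal_iff_canon r q).mpr hqs.symm)]
        exact hrk ▸ List.mem_cons_self
      · by_cases hpr : pvS p = pvS r
        · left
          refine List.mem_flatMap.mpr ⟨r, hrt, ?_⟩
          rw [if_pos ((pv_equal_iff_canon p r).mpr hpr)]
          subst hrk
          simp
        · right
          refine ⟨r, hrt, hrk, ?_⟩
          rw [List.map_cons, List.count_cons_of_ne (fun he => hpr he)] at hc
          exact hc

lemma pv_dlist_nil_iff (l : List (String × List String)) :
    pvDList l = [] ↔ (l.map pvS).Nodup := by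
  unfold pvDList
  rw [List.map_eq_nil_iff, List.filter_eq_nil_iff, List.nodup_iff_count_le_one]
  constructor
  · intro h a
    by_cases ha : a ∈ l.map pvS
    · rcases List.mem_map.mp ha with ⟨r, hr, rfl⟩
      have := h r hr
      simp only [decide_eq_true_eq] at this
      omega
    · rw [List.count_eq_zero_of_not_mem ha]; omega
  · intro h r hr
    simp only [decide_eq_true_eq]
    have := h (pvS r)
    omega
lemma pv_dlist_mem (l : List (String × List String)) (k : String) :
    k ∈ pvDList l ↔ ∃ r ∈ l, r.1 = k ∧ 2 ≤ (l.map pvS).count (pvS r) := by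
  unfold pvDList
  simp only [List.mem_map, List.mem_filter, decide_eq_true_eq]
  constructor
  · rintro ⟨r, ⟨hr, hc⟩, rfl⟩
    exact ⟨r, hr, rfl, hc⟩
  · rintro ⟨r, hr, rfl, hc⟩
    exact ⟨r, ⟨hr, hc⟩, rfl⟩

lemma pv_cd_mem (l : List (String × List String)) (k : String) :
    k ∈ pvCList l ↔ k ∈ pvDList l := by
  rw [pv_clist_mem, pv_dlist_mem]

lemma pv_foldA (rm : List (String × List String)) :
    (PySem.List.combinations (PySem.Dict.ofList rm).keys 2).foldl
      (fun st ck =>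
        match ck with
        | [a, b] =>
          if PySem.Set.equal (pvSigSet ((PySem.Dict.ofList rm).getD a []))
              (pvSigSet ((PySem.Dict.ofList rm).getD b [])) then
            (st.1 + 1, st.2 ++ [a, b])
          else st
        | _ => st) ((0 : Int), ([] : List String))
    = (pvMCount (PySem.Dict.ofList rm).items, pvCList (PySem.Dict.ofList rm).items) := by
  have hkeys : (PySem.Dict.ofList rm).keys = (PySem.Dict.ofList rm).items.map (fun p => p.1) := rfl
  rw [hkeys, PySem.List.combinations_map, List.foldl_map]
  rw [PySem.List.foldl_congr_mem _ _ pvStep _ ?_]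
  · rw [pv_loopA]
    simp
  · intro acc c hc
    rcases (PySem.List.mem_combinations_iff _ _ _).mp hc with ⟨hsub, hlen⟩
    rcases c with _ | ⟨p, _ | ⟨q, _ | _⟩⟩ <;> simp at hlen
    have hp : p ∈ (PySem.Dict.ofList rm).items := hsub.subset (by simp)
    have hq : q ∈ (PySem.Dict.ofList rm).items := hsub.subset (by simp)
    show (if PySem.Set.equal (pvSigSet ((PySem.Dict.ofList rm).getD p.1 []))
              (pvSigSet ((PySem.Dict.ofList rm).getD q.1 [])) then
            (acc.1 + 1, acc.2 ++ [p.1, q.1])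
          else acc) = pvStep acc [p, q]
    rw [PySem.Dict.getD_of_mem_items _ hp (PySem.Dict.nodup_keys_ofList rm) [],
      PySem.Dict.getD_of_mem_items _ hq (PySem.Dict.nodup_keys_ofList rm) []]
    rfl

lemma pv_fI_cast (c : Nat) :
    PySem.Int.floordiv ((c : Int) * ((c : Int) - 1)) 2 = (pvFN c : Int) := by
  rcases c with _ | k
  · decide
  · have h1 : ((k + 1 : Nat) : Int) * (((k + 1 : Nat) : Int) - 1) = (((k + 1) * k : Nat) : Int) := by
      push_cast; ring
    rw [h1, show (2 : Int) = ((2 : Nat) : Int) from rfl, PySem.Int.floordiv_natCast]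
    unfold pvFN
    norm_num

lemma pv_pairs_eq (sl : List (List String)) :
    ((PySem.Set.ofList sl).map
      (fun k => PySem.Int.floordiv ((List.count k sl : Int) * ((List.count k sl : Int) - 1)) 2)).sum
      = (pvRN sl : Int) := by
  have hperm : (PySem.Set.ofList sl).Perm sl.dedup :=
    (List.perm_ext_iff_of_nodup (PySem.Set.nodup_ofList _) (List.nodup_dedup _)).mpr
      (fun a => by rw [PySem.Set.mem_ofList, List.mem_dedup])
  rw [List.Perm.sum_eq (hperm.map _)]
  unfold pvRN
  rw [Nat.cast_list_sum, List.map_map]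
  apply congrArg
  apply List.map_congr_left
  intro v _
  simp only [Function.comp]
  exact pv_fI_cast _

lemma pv_head_eq (l : List (String × List String)) (hne : pvDList l ≠ []) :
    ∃ m c tl, PySem.List.max? (pvDList l) (fun x => x) = some m ∧
      PySem.List.sorted (PySem.Dict.counter (pvCList l)).items (fun x => x.1) true = (m, c) :: tl := by
  rcases List.exists_mem_of_ne_nil _ hne with ⟨k, hk⟩
  cases hm : PySem.List.max? (pvDList l) (fun x => x) with
  | none =>
    exact absurd (((PySem.List.max?_eq_none_iff _ _).mp hm)) hne
  | some m =>
    have hmD : m ∈ pvDList l := PySem.List.max?_mem hm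
    have hmax : ∀ y ∈ pvDList l, y ≤ m := fun y hy => PySem.List.max?_isMax hm y hy
    have hmC : m ∈ pvCList l := (pv_cd_mem l m).mpr hmD
    have hitems : (PySem.Dict.counter (pvCList l)).items =
        (PySem.Set.ofList (pvCList l)).map (fun k => (k, (List.count k (pvCList l) : Int))) :=
      PySem.Dict.items_counter _
    have hnil : (PySem.Dict.counter (pvCList l)).items ≠ [] := by
      rw [hitems]
      exact List.ne_nil_of_mem (List.mem_map.mpr ⟨m, (PySem.Set.mem_ofList _ _).mpr hmC, rfl⟩)
    cases hs : PySem.List.sorted (PySem.Dict.counter (pvCList l)).items (fun x => x.1) true with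
    | nil =>
      exact absurd ((PySem.List.sorted_eq_nil_iff _ _ _).mp hs) hnil
    | cons h tl =>
      have hhmem : h ∈ (PySem.Dict.counter (pvCList l)).items := by
        rw [← PySem.List.mem_sorted _ (fun x : String × Int => x.1) true, hs]
        exact List.mem_cons_self
      have hpw := PySem.List.sorted_pairwise_rev (PySem.Dict.counter (pvCList l)).items
        (fun x : String × Int => x.1)
      rw [hs, List.pairwise_cons] at hpw
      have hbound : ∀ q ∈ (PySem.Dict.counter (pvCList l)).items, q.1 ≤ h.1 := by
        intro q hq
        have : q ∈ h :: tl := by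
          rw [← hs, PySem.List.mem_sorted]
          exact hq
        rcases List.mem_cons.mp this with rfl | hqt
        · exact le_refl _
        · exact hpw.1 q hqt
      have hh1C : h.1 ∈ pvCList l := by
        rw [hitems] at hhmem
        rcases List.mem_map.mp hhmem with ⟨k', hk', rfl⟩
        exact (PySem.Set.mem_ofList _ _).mp hk'
      have h1 : h.1 ≤ m := hmax _ ((pv_cd_mem l h.1).mp hh1C)
      have h2 : m ≤ h.1 := by
        have : (m, (List.count m (pvCList l) : Int)) ∈ (PySem.Dict.counter (pvCList l)).items := by
          rw [hitems]
          exact List.mem_map.mpr ⟨m, (PySem.Set.mem_ofList _ _).mpr hmC, rfl⟩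
        exact hbound _ this
      have heq : h.1 = m := le_antisymm h1 h2
      exact ⟨h.1, h.2, tl, by rw [heq], rfl⟩
lemma pv_altB (rm : List (String × List String)) (th tot : Int) :
    left_judge_alt rm th tot =
      (if (((PySem.Dict.ofList rm).items.length : Nat) : Int) < th then []
       else if (pvRN ((PySem.Dict.ofList rm).items.map pvS) : Int) < tot - 1 ∨
           pvDList (PySem.Dict.ofList rm).items = [] then []
       else
         match PySem.List.max? (pvDList (PySem.Dict.ofList rm).items) (fun x => x) with
         | some m => (PySem.Dict.ofList rm).getD m []
         | none => []) := by
  unfold left_judge_alt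
  simp only []
  set l := (PySem.Dict.ofList rm).items with hl
  have hsig : (l.map (fun p => (p.1, pvCanon p.2))).map (fun q => q.2) = l.map pvS := by
    rw [List.map_map]
    rfl
  have hv : (PySem.Dict.counter (l.map pvS)).values =
      (PySem.Set.ofList (l.map pvS)).map (fun k => (List.count k (l.map pvS) : Int)) := by
    show ((PySem.Dict.counter (l.map pvS)).items).map (fun p => p.2) = _
    rw [PySem.Dict.items_counter, List.map_map]
    rfl
  rw [hsig]
  have hpairs : ((PySem.Dict.counter (l.map pvS)).values.map
      (fun c => PySem.Int.floordiv (c * (c - 1)) 2)).sum = (pvRN (l.map pvS) : Int) := by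
    rw [hv, List.map_map]
    exact pv_pairs_eq _
  have hdups : ((l.map (fun p => (p.1, pvCanon p.2))).filter
        (fun q => decide (2 ≤ (PySem.Dict.counter (l.map pvS)).getD q.2 0))).map (fun q => q.1)
      = pvDList l := by
    rw [List.filter_map, List.map_map]
    unfold pvDList
    have hpred : ∀ p ∈ l,
        ((fun q : String × List String => decide (2 ≤ (PySem.Dict.counter (l.map pvS)).getD q.2 0)) ∘
          (fun p => (p.1, pvCanon p.2))) p
        = decide (2 ≤ (l.map pvS).count (pvS p)) := by
      intro p _
      simp only [Function.comp, PySem.Dict.getD_counter]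
      rw [decide_eq_decide]
      show (2 : Int) ≤ (List.count (pvCanon p.2) (l.map pvS) : Int) ↔ _
      rw [show pvS p = pvCanon p.2 from rfl]
      exact_mod_cast Iff.rfl
    rw [List.filter_congr hpred]
    rfl
  rw [hpairs, hdups]


-- ===== VERDICT (by name: the statement is the Claim_ definition above) =====
theorem left_judge_spec : Claim_equal_left_judge := by
  intro response_map threshold total _ hpre
  unfold Spec_left_judge
  rw [pv_altB]
  unfold left_judge
  simp only []
  rw [pv_foldA]
  set l := (PySem.Dict.ofList response_map).items with hl
  have hkeys : (PySem.Dict.ofList response_map).keys = l.map (fun p => p.1) := rfl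
  rw [hkeys, List.length_map]
  by_cases hth : threshold ≤ ((l.length : Nat) : Int)
  · rw [if_pos hth, if_neg (not_lt.mpr hth)]
    by_cases hc : total - 1 ≤ (pvMCount l, pvCList l).1
    · by_cases hdn : pvDList l = []
      · exfalso
        have hnd : (l.map pvS).Nodup := (pv_dlist_nil_iff l).mp hdn
        have hz : pvMCount l = 0 := by
          rw [pv_mcount_eq, (pv_RN_zero_iff _).mpr hnd]
          rfl
        apply hpre
        refine ⟨hth, ?_, hnd⟩
        simp only [hz] at hc
        omega
      · rcases pv_head_eq l hdn with ⟨m, c, tl, hm, hs⟩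
        rw [if_pos hc]
        have hcond : ¬ ((pvRN (l.map pvS) : Int) < total - 1 ∨ pvDList l = []) := by
          rw [not_or]
          exact ⟨not_lt.mpr (by rw [← pv_mcount_eq]; exact hc), hdn⟩
        rw [if_neg hcond, hs, hm]
    · rw [if_neg hc]
      have hcond : (pvRN (l.map pvS) : Int) < total - 1 ∨ pvDList l = [] :=
        Or.inl (by rw [← pv_mcount_eq]; exact not_le.mp hc)
      rw [if_pos hcond]
  · rw [if_neg hth, if_pos (not_le.mp hth)]
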